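-- pv_equiv track=rewrite | github.com/NukerDucker/01276121_Computer_Programming | Chapter_8/old/ch8_5_old.py | num_generator
-- ===== SOURCE A (Python) =====
-- def num_generator(num_range):
--     num_str = ''
--     num = 1
--     for _ in range(1, num_range + 1):
--         if num == 10:
--             num = 0
--         num_str += f'{num}'
--         num += 1
--     return num_str
-- ===== SOURCE B (Python) =====
-- def num_generator(num_range):
--     return ('1234567890' * (num_range // 10 + 1))[:num_range]
-- ===== Notes on version B (the rewrite author's own statement) =====
-- stated objective: faster
-- what changed: Replaces the per-character loop with its digit counter and reset-at-10 branch by a closed form: repeat the fixed period '1234567890' enough times and slice to the requested length.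
import Mathlib
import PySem

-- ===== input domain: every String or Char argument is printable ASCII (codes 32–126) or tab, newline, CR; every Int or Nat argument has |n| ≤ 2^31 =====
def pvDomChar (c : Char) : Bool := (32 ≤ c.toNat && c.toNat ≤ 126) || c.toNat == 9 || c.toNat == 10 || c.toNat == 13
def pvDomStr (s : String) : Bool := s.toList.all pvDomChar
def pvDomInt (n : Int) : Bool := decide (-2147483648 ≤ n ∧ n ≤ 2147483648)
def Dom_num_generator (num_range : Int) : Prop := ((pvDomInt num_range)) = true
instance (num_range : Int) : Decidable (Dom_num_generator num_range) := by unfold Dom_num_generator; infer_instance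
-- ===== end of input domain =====

-- B replaces A's per-character loop (with a digit counter reset at 10) by a closed form:
-- repeat the fixed period '1234567890' enough times and slice to the requested length.

-- ===== PORT A =====
-- one loop iteration: reset the counter at 10, append its digit, increment
def numGenStep (st : String × Int) (_ : Int) : String × Int :=
  let num : Int := if st.2 = 10 then 0 else st.2
  (st.1 ++ PySem.Int.toStr num, num + 1)

def num_generator (num_range : Int) : String :=
  ((PySem.List.pyRange 1 (num_range + 1) 1).foldl numGenStep ("", 1)).1

-- ===== PORT B =====
-- Python's 's * k' (k ≤ 0 gives ''), ported by hand as flattened replication of the char list (exact)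
def pyStrMul (s : String) (k : Int) : String :=
  String.ofList (List.replicate k.toNat s.toList).flatten

def num_generator_alt (num_range : Int) : String :=
  PySem.Str.slice (pyStrMul "1234567890" (PySem.Int.floordiv num_range 10 + 1)) none (some num_range)

-- ===== PRECONDITION & SPEC =====
def Spec_num_generator (num_range : Int) (out : String) : Prop := out = num_generator_alt num_range
instance (num_range : Int) (out : String) : Decidable (Spec_num_generator num_range out) := by unfold Spec_num_generator; infer_instance

-- ===== CLAIM (what is proved, stated in full; the proofs are below) =====
def Claim_equal_num_generator : Prop := ∀ (num_range : Int), Dom_num_generator num_range → Spec_num_generator num_range (num_generator num_range)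

-- ===== LEMMAS AND PROOFS =====

-- the character at position j of the infinite digit cycle 1,2,…,9,0
def dchar (j : Nat) : Char := Char.ofNat (48 + (j + 1) % 10)

theorem dchar_period (m j : Nat) : dchar (10 * m + j) = dchar j := by
  unfold dchar
  congr 1
  omega

-- repeating the period string gives the cycle
theorem flatten_replicate_period (m : Nat) :
    (List.replicate m ("1234567890".toList)).flatten = (List.range (10 * m)).map dchar := by
  induction m with
  | zero => simp
  | succ m ih =>
    rw [List.replicate_succ', List.flatten_append, ih]
    have h10 : 10 * (m + 1) = 10 * m + 10 := by ring
    rw [h10, List.range_add, List.map_append]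
    congr 1
    symm
    rw [List.map_map]
    have hmc : (List.range 10).map (dchar ∘ fun j => 10 * m + j) = (List.range 10).map dchar :=
      List.map_congr_left (fun j _ => dchar_period m j)
    rw [hmc]
    decide

-- A's element-ignoring fold is an iterate of the step
theorem foldl_numGenStep (l : List Int) (init : String × Int) :
    l.foldl numGenStep init = (fun st => numGenStep st 0)^[l.length] init := by
  induction l generalizing init with
  | nil => rfl
  | cons x xs ih =>
    rw [List.foldl_cons, List.length_cons, Function.iterate_succ_apply]
    exact ih _

-- the step on a state with counter r+1, 0 ≤ r < 10
theorem step_digit (r : Nat) (hr : r < 10) :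
    PySem.Int.toStr (if ((r : Int) + 1) = 10 then 0 else (r : Int) + 1) = String.ofList [dchar r]
    ∧ (if ((r : Int) + 1) = 10 then (0 : Int) else (r : Int) + 1) + 1 = (((r + 1) % 10 : Nat) : Int) + 1 := by
  interval_cases r <;> exact ⟨by decide, by decide⟩

-- loop invariant: after k iterations the string is the first k cycle characters
theorem iterate_numGenStep (k : Nat) :
    (fun st => numGenStep st 0)^[k] ("", 1)
      = (String.ofList ((List.range k).map dchar), ((k % 10 : Nat) : Int) + 1) := by
  induction k with
  | zero => decide
  | succ k ih =>
    rw [Function.iterate_succ_apply', ih]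
    have hr : k % 10 < 10 := Nat.mod_lt _ (by norm_num)
    obtain ⟨h1, h2⟩ := step_digit (k % 10) hr
    unfold numGenStep
    simp only [h1, h2]
    have hs : String.ofList (List.map dchar (List.range k)) ++ String.ofList [dchar (k % 10)]
        = String.ofList (List.map dchar (List.range (k + 1))) := by
      rw [List.range_succ, List.map_append, List.map_singleton]
      have hd : dchar k = dchar (k % 10) := by
        conv_lhs => rw [show k = 10 * (k / 10) + k % 10 by omega]
        exact dchar_period _ _
      simp [hd]
    rw [hs, show (k % 10 + 1) % 10 = (k + 1) % 10 from by omega]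

theorem num_generator_eq (n : Int) :
    num_generator n = String.ofList ((List.range n.toNat).map dchar) := by
  unfold num_generator
  rw [foldl_numGenStep, PySem.List.length_pyRange_one]
  rw [show (n + 1 - 1).toNat = n.toNat by omega, iterate_numGenStep]

theorem slice_toList (s : String) (b : Option Int) :
    (PySem.Str.slice s none b).toList = PySem.List.slice s.toList none b := by
  simp [PySem.Str.slice]

theorem num_generator_alt_eq (n : Int) :
    num_generator_alt n = String.ofList ((List.range n.toNat).map dchar) := by
  unfold num_generator_alt pyStrMul
  have hfd : PySem.Int.floordiv n 10 = n / 10 := by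
    show n.fdiv 10 = n / 10
    rw [Int.fdiv_eq_ediv]
    norm_num
  rw [hfd]
  apply String.toList_injective
  rw [slice_toList]
  simp only [String.toList_ofList]
  by_cases hn : 0 ≤ n
  · rw [PySem.List.slice_to _ hn, flatten_replicate_period]
    have hle : n.toNat ≤ 10 * (n / 10 + 1).toNat := by omega
    rw [← List.map_take, List.take_range, Nat.min_eq_left hle]
  · replace hn : n < 0 := by omega
    have hm : (n / 10 + 1).toNat = 0 := by omega
    rw [hm]
    obtain ⟨k, hk0, rfl⟩ : ∃ k : Nat, 0 < k ∧ n = -(k : Int) := ⟨(-n).toNat, by omega, by omega⟩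
    rw [PySem.List.slice_to_neg_natCast _ k hk0]
    have h0 : (-(k : Int)).toNat = 0 := by omega
    rw [h0]
    simp

-- ===== VERDICT (by name: the statement is the Claim_ definition above) =====
theorem num_generator_spec : Claim_equal_num_generator := by
  intro n _
  show num_generator n = num_generator_alt n
  rw [num_generator_eq, num_generator_alt_eq]
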